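-- pv_equiv track=rewrite | github.com/xihuai18/skills | mineru-api/scripts/mineru_to_markdown.py | rewrite_markdown
-- ===== SOURCE A (Python) =====
-- def rewrite_markdown(text: str, rename: dict[str, str], asset_dir: str) -> str:
--     updated = text
--     for old, new in rename.items():
--         updated = updated.replace(old, f"{asset_dir}/{new}")
--
--     lines = [line.rstrip() for line in updated.splitlines()]
--     compact: list[str] = []
--     blank = 0
--     for line in lines:
--         if line:
--             blank = 0
--             compact.append(line)
--             continue
--         blank += 1
--         if blank <= 2:
--             compact.append("")
--     return "\n".join(compact).strip() + "\n"
-- ===== SOURCE B (Python) =====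
-- def rewrite_markdown(text: str, rename: dict[str, str], asset_dir: str) -> str:
--     updated = text
--     for old, new in rename.items():
--         updated = updated.replace(old, f"{asset_dir}/{new}")
--
--     lines = [line.rstrip() for line in updated.splitlines()]
--     compact: list[str] = []
--     i = 0
--     n = len(lines)
--     while i < n:
--         j = i
--         if lines[i]:
--             while j < n and lines[j]:
--                 j += 1
--             compact.extend(lines[i:j])
--         else:
--             while j < n and not lines[j]:
--                 j += 1
--             compact.extend([""] * min(2, j - i))
--         i = j
--     return "\n".join(compact).strip() + "\n"
-- ===== Notes on version B (the rewrite author's own statement) =====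
-- stated objective: alternative
-- what changed: The blank-counter accumulator loop over lines is replaced by a two-pointer scan that emits maximal non-blank runs whole and caps each maximal blank run at two empty lines.
import Mathlib
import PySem

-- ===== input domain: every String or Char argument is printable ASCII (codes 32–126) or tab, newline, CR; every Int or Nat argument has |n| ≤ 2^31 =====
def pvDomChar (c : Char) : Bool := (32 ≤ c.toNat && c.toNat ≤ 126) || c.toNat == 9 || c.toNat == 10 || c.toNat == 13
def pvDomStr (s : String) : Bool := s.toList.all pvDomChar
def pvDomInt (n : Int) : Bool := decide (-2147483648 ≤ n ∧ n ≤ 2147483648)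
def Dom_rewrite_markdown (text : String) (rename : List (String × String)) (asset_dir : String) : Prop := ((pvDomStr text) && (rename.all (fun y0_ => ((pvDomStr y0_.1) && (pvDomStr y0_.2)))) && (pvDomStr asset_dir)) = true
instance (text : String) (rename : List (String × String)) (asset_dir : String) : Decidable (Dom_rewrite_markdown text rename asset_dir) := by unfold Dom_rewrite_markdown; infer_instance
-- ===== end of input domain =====

-- B replaces A's blank-counter loop by a two-pointer scan over maximal runs of
-- blank / non-blank lines (objective: alternative decomposition, same cost).

-- ===== PORT A =====
def rewrite_markdown (text : String) (rename : List (String × String)) (asset_dir : String) : String :=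
  let updated := rename.foldl (fun u p => PySem.Str.replace u p.1 (asset_dir ++ "/" ++ p.2)) text
  let lines := (PySem.Str.splitlines updated).map (fun line => PySem.Str.rstrip line)
  let st := lines.foldl
    (fun (st : List String × Nat) line =>
      if line ≠ "" then (st.1 ++ [line], 0)
      else
        let blank := st.2 + 1
        (if blank ≤ 2 then st.1 ++ [""] else st.1, blank))
    ([], 0)
  PySem.Str.strip (PySem.Str.join "\n" st.1) ++ "\n"

-- ===== PORT B =====
-- B's while-loop scanning runs: at each position take the maximal run of lines of
-- the same blankness; emit a non-blank run whole, a blank run capped at 2 empties.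
def rmAltRuns (lines : List String) : List String :=
  match lines with
  | [] => []
  | l :: rest =>
    if l ≠ "" then
      (l :: rest.takeWhile (· ≠ "")) ++ rmAltRuns (rest.dropWhile (· ≠ ""))
    else
      List.replicate (min 2 (l :: rest.takeWhile (· = "")).length) "" ++ rmAltRuns (rest.dropWhile (· = ""))
termination_by lines.length
decreasing_by
  · exact Nat.lt_succ_of_le (List.length_dropWhile_le _ _)
  · exact Nat.lt_succ_of_le (List.length_dropWhile_le _ _)

def rewrite_markdown_alt (text : String) (rename : List (String × String)) (asset_dir : String) : String :=
  let updated := rename.foldl (fun u p => PySem.Str.replace u p.1 (asset_dir ++ "/" ++ p.2)) text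
  let lines := (PySem.Str.splitlines updated).map (fun line => PySem.Str.rstrip line)
  PySem.Str.strip (PySem.Str.join "\n" (rmAltRuns lines)) ++ "\n"

-- ===== PRECONDITION & SPEC =====
def Spec_rewrite_markdown (text : String) (rename : List (String × String)) (asset_dir : String) (out : String) : Prop := out = rewrite_markdown_alt text rename asset_dir
instance (text : String) (rename : List (String × String)) (asset_dir : String) (out : String) : Decidable (Spec_rewrite_markdown text rename asset_dir out) := by unfold Spec_rewrite_markdown; infer_instance

-- ===== CLAIM (what is proved, stated in full; the proofs are below) =====
def Claim_equal_rewrite_markdown : Prop := ∀ (text : String) (rename : List (String × String)) (asset_dir : String), Dom_rewrite_markdown text rename asset_dir → Spec_rewrite_markdown text rename asset_dir (rewrite_markdown text rename asset_dir)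

-- ===== LEMMAS AND PROOFS =====

-- A's compaction loop without the accumulator
def goA (b : Nat) (ls : List String) : List String :=
  match ls with
  | [] => []
  | l :: ls =>
    if l ≠ "" then l :: goA 0 ls
    else (if b + 1 ≤ 2 then [""] else []) ++ goA (b + 1) ls

theorem foldlA_eq_goA (ls : List String) (acc : List String) (b : Nat) :
    (ls.foldl
      (fun (st : List String × Nat) line =>
        if line ≠ "" then (st.1 ++ [line], 0)
        else
          let blank := st.2 + 1
          (if blank ≤ 2 then st.1 ++ [""] else st.1, blank))
      (acc, b)).1 = acc ++ goA b ls := by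
  induction ls generalizing acc b with
  | nil => simp [goA]
  | cons l ls ih =>
    rw [List.foldl_cons]
    by_cases h : l = ""
    · subst h
      by_cases h2 : b + 1 ≤ 2
      · have hstep : (if ("" : String) ≠ "" then ((acc, b).1 ++ [""], 0)
            else
              let blank := (acc, b).2 + 1
              (if blank ≤ 2 then (acc, b).1 ++ [""] else (acc, b).1, blank))
            = ((acc ++ [""], b + 1) : List String × Nat) := by simp [h2]
        rw [hstep, ih]
        simp [goA, h2]
      · have hstep : (if ("" : String) ≠ "" then ((acc, b).1 ++ [""], 0)
            else
              let blank := (acc, b).2 + 1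
              (if blank ≤ 2 then (acc, b).1 ++ [""] else (acc, b).1, blank))
            = ((acc, b + 1) : List String × Nat) := by simp [h2]
        rw [hstep, ih]
        simp [goA, h2]
    · have hstep : (if l ≠ "" then ((acc, b).1 ++ [l], 0)
            else
              let blank := (acc, b).2 + 1
              (if blank ≤ 2 then (acc, b).1 ++ [""] else (acc, b).1, blank))
            = ((acc ++ [l], 0) : List String × Nat) := by simp [h]
      rw [hstep, ih]
      simp [goA, h]

theorem goA_head_ne (b : Nat) (ls : List String)
    (h : ls = [] ∨ ∃ l t, ls = l :: t ∧ l ≠ "") : goA b ls = goA 0 ls := by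
  rcases h with h | ⟨l, t, rfl, hl⟩
  · simp [h, goA]
  · simp [goA, hl]

theorem goA_nonblank_run (run rest : List String) (h : ∀ x ∈ run, x ≠ "") :
    goA 0 (run ++ rest) = run ++ goA 0 rest := by
  induction run with
  | nil => simp
  | cons l t ih =>
    have hl := h l (by simp)
    simp only [List.cons_append, goA]
    simp [ih (fun x hx => h x (by simp [hx])), hl]

theorem goA_blank_run (k b : Nat) (rest : List String) :
    goA b (List.replicate k "" ++ rest) =
      List.replicate (min (2 - b) k) "" ++ goA (b + k) rest := by
  induction k generalizing b with
  | zero => simp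
  | succ k ih =>
    simp only [List.replicate_succ, List.cons_append, goA]
    simp only [ne_eq, not_true_eq_false, if_false, ih]
    by_cases hb : b + 1 ≤ 2
    · have h1 : min (2 - b) (k + 1) = (min (2 - (b + 1)) k) + 1 := by omega
      have h2 : b + 1 + k = b + (k + 1) := by omega
      simp [hb, h1, h2, List.replicate_succ]
    · have h1 : min (2 - b) (k + 1) = min (2 - (b + 1)) k := by omega
      have h2 : b + 1 + k = b + (k + 1) := by omega
      simp [hb, h1, h2]

theorem dropWhile_head_not (p : String → Bool) (ls : List String) :
    ls.dropWhile p = [] ∨ ∃ l t, ls.dropWhile p = l :: t ∧ p l = false := by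
  induction ls with
  | nil => simp
  | cons l t ih =>
    by_cases h : p l
    · simpa [List.dropWhile, h] using ih
    · exact Or.inr ⟨l, t, by simp [h], by simp [h]⟩

theorem rmAltRuns_eq_goA (ls : List String) : rmAltRuns ls = goA 0 ls := by
  induction hn : ls.length using Nat.strong_induction_on generalizing ls with
  | _ n ih =>
  match ls with
  | [] => simp [rmAltRuns, goA]
  | l :: rest =>
    rw [rmAltRuns]
    by_cases hl : l = ""
    · simp only [hl, ne_eq, not_true_eq_false, if_false]
      set run := rest.takeWhile (· = "") with hrun
      set rest' := rest.dropWhile (· = "") with hrest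
      have hrepl : ("" : String) :: run = List.replicate (("" :: run).length) "" := by
        apply List.eq_replicate_of_mem
        intro x hx
        rcases List.mem_cons.mp hx with h | h
        · exact h
        · have := List.takeWhile_subset (p := (· = "")) (l := rest)
          have hx2 := List.mem_takeWhile_imp h
          simpa using hx2
      have hsplit : ("" : String) :: rest = List.replicate (("" :: run).length) "" ++ rest' := by
        rw [← hrepl]
        simp [hrun, hrest, List.takeWhile_append_dropWhile]
      have hgo : goA 0 (("" : String) :: rest) =
          List.replicate (min 2 (("" :: run).length)) "" ++ goA 0 rest' := by
        rw [hsplit, goA_blank_run]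
        have h2 : (2 : Nat) - 0 = 2 := rfl
        rw [h2, Nat.zero_add, goA_head_ne]
        rcases dropWhile_head_not (· = "") rest with h | ⟨a, t, heq, ha⟩
        · left; rw [hrest]; exact h
        · right; exact ⟨a, t, by rw [hrest]; exact heq, by simpa using ha⟩
      rw [hgo]
      congr 1
      have hlen : rest'.length < n := by
        rw [← hn]
        simp only [List.length_cons, hrest]
        exact Nat.lt_succ_of_le (List.length_dropWhile_le _ _)
      exact ih _ hlen _ rfl
    · simp only [hl, ne_eq, not_false_eq_true, if_true]
      set run := rest.takeWhile (· ≠ "") with hrun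
      set rest' := rest.dropWhile (· ≠ "") with hrest
      have hsplit : l :: rest = (l :: run) ++ rest' := by
        simp [hrun, hrest, List.takeWhile_append_dropWhile]
      have hall : ∀ x ∈ (l :: run), x ≠ "" := by
        intro x hx
        rcases List.mem_cons.mp hx with h | h
        · simpa [h] using hl
        · have := List.mem_takeWhile_imp h
          simpa using this
      have hgo : goA 0 (l :: rest) = (l :: run) ++ goA 0 rest' := by
        rw [hsplit, goA_nonblank_run _ _ hall]
      rw [hgo]
      congr 1
      have hlen : rest'.length < n := by
        rw [← hn]
        simp only [List.length_cons, hrest]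
        exact Nat.lt_succ_of_le (List.length_dropWhile_le _ _)
      exact ih _ hlen _ rfl

-- ===== VERDICT (by name: the statement is the Claim_ definition above) =====
theorem rewrite_markdown_spec : Claim_equal_rewrite_markdown := by
  intro text rename asset_dir _
  unfold Spec_rewrite_markdown rewrite_markdown rewrite_markdown_alt
  simp only [foldlA_eq_goA, List.nil_append, rmAltRuns_eq_goA]
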